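-- pv_equiv track=rewrite | github.com/Mohanraj-00/Boat-Team-Formation | Boat Team Formation.py | max_teams
-- ===== SOURCE A (Python) =====
-- def max_teams(N, weights):
--     from collections import Counter
--
--     # Count occurrences of each weight
--     weight_counter = Counter(weights)
--
--     max_teams = 0
--
--     # Check for all possible sums s from 2 to 2N
--     for s in range(2, 2 * N + 1):
--         temp_counter = weight_counter.copy()
--         teams = 0
--
--         for weight in weights:
--             if temp_counter[weight] > 0 and temp_counter[s - weight] > 0:
--                 if weight == s - weight and temp_counter[weight] < 2:
--                     continue
--                 temp_counter[weight] -= 1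
--                 temp_counter[s - weight] -= 1
--                 teams += 1
--
--         max_teams = max(max_teams, teams)
--
--     return max_teams
-- ===== SOURCE B (Python) =====
-- def max_teams(N, weights):
--     # Closed form per target sum: pairs(s) = sum over distinct w with 2w < s of
--     # min(count[w], count[s-w]) plus count[s/2] // 2 when s is even.
--     counts = {}
--     for w in weights:
--         counts[w] = counts.get(w, 0) + 1
--     best = 0
--     for s in range(2, 2 * N + 1):
--         teams = 0
--         for w, c in counts.items():
--             if 2 * w < s:
--                 teams += min(c, counts.get(s - w, 0))
--             elif 2 * w == s:
--                 teams += c // 2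
--         best = max(best, teams)
--     return best
-- ===== Notes on version B (the rewrite author's own statement) =====
-- stated objective: faster
-- what changed: Per target sum, A replays a greedy pairing pass over the whole weights list with a fresh Counter copy; B computes the same count with a closed form over the distinct weights only: sum of min(count[w], count[s-w]) for 2w<s plus count[s/2]//2.
import Mathlib
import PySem

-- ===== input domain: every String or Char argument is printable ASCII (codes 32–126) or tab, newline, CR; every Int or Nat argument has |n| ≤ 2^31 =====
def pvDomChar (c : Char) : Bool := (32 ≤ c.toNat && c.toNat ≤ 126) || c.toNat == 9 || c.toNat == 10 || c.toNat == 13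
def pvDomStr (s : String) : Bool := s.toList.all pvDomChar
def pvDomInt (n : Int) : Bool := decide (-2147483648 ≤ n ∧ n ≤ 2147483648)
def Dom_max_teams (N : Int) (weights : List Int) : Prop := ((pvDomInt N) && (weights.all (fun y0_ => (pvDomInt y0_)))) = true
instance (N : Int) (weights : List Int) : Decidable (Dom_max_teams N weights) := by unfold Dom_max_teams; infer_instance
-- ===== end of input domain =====

-- B replaces A's per-sum greedy pass over the whole weights list by the closed form
-- sum over distinct weights w of min(count[w], count[s-w]) (plus count[s/2]//2), per target sum.


-- ===== PORT A =====
def max_teams (N : Int) (weights : List Int) : Int :=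
  let weight_counter := PySem.Dict.counter weights
  (PySem.List.pyRange 2 (2 * N + 1) 1).foldl (fun best s =>
    let r := weights.foldl (fun (st : PySem.Dict Int Int × Int) w =>
      if st.1.getD w 0 > 0 && st.1.getD (s - w) 0 > 0 then
        if w == s - w && st.1.getD w 0 < 2 then st
        else
          let t1 := st.1.insert w (st.1.getD w 0 - 1)
          let t2 := t1.insert (s - w) (t1.getD (s - w) 0 - 1)
          (t2, st.2 + 1)
      else st) (weight_counter, 0)
    max best r.2) 0

-- ===== PORT B =====
def max_teams_alt (N : Int) (weights : List Int) : Int :=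
  let counts := weights.foldl (fun d w => d.insert w (d.getD w 0 + 1)) (PySem.Dict.empty)
  (PySem.List.pyRange 2 (2 * N + 1) 1).foldl (fun best s =>
    let teams := counts.items.foldl (fun (acc : Int) (p : Int × Int) =>
      if 2 * p.1 < s then acc + min p.2 (counts.getD (s - p.1) 0)
      else if 2 * p.1 == s then acc + PySem.Int.floordiv p.2 2
      else acc) 0
    max best teams) 0

-- ===== PRECONDITION & SPEC =====
def Spec_max_teams (N : Int) (weights : List Int) (out : Int) : Prop := out = max_teams_alt N weights
instance (N : Int) (weights : List Int) (out : Int) : Decidable (Spec_max_teams N weights out) := by unfold Spec_max_teams; infer_instance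

-- ===== CLAIM (what is proved, stated in full; the proofs are below) =====
def Claim_equal_max_teams : Prop := ∀ (N : Int) (weights : List Int), Dom_max_teams N weights → Spec_max_teams N weights (max_teams N weights)

-- ===== LEMMAS AND PROOFS =====

def decAt (t : Int → Int) (k : Int) : Int → Int := fun v => if v = k then t k - 1 else t v

def gA (s : Int) : List Int → (Int → Int) → Int
  | [], _ => 0
  | w :: ws, t =>
    if 0 < t w ∧ 0 < t (s - w) then
      (if w = s - w ∧ t w < 2 then gA s ws t
       else 1 + gA s ws (decAt (decAt t w) (s - w)))
    else gA s ws t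

def pairTerm (s : Int) (t : Int → Int) (ws : List Int) (a : Int) : Int :=
  if 2 * a = s then min (t a / 2) (ws.count a : Int)
  else min (t a) (min (t (s - a)) ((ws.count a : Int) + (ws.count (s - a) : Int)))

def Fterm (s : Int) (t : Int → Int) (ws : List Int) (a : Int) : Int :=
  if 2 * a ≤ s then pairTerm s t ws a else 0

def stepA (s : Int) (st : PySem.Dict Int Int × Int) (w : Int) : PySem.Dict Int Int × Int :=
  if 0 < st.1.getD w 0 ∧ 0 < st.1.getD (s - w) 0 then
    if w = s - w ∧ st.1.getD w 0 < 2 then st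
    else
      ((st.1.insert w (st.1.getD w 0 - 1)).insert (s - w)
        ((st.1.insert w (st.1.getD w 0 - 1)).getD (s - w) 0 - 1), st.2 + 1)
  else st

def cntF (ws : List Int) : Int → Int := fun v => (ws.count v : Int)

def bterm (s : Int) (ws : List Int) (k : Int) : Int :=
  if 2 * k < s then min (ws.count k : Int) (ws.count (s - k) : Int)
  else if 2 * k = s then (ws.count k : Int) / 2
  else 0

lemma count_cons_ne (x w : Int) (ws : List Int) (h : x ≠ w) :
    List.count x (w :: ws) = List.count x ws := by
  simp [Ne.symm h]

lemma Fterm_off (s : Int) (t t' : Int → Int) (ws : List Int) (w x : Int)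
    (hx : x ≠ w) (hsx : s - x ≠ w)
    (ht'x : t' x = t x) (ht'sx : t' (s - x) = t (s - x)) :
    Fterm s t (w :: ws) x = Fterm s t' ws x := by
  unfold Fterm pairTerm
  rw [count_cons_ne x w ws hx, count_cons_ne (s - x) w ws hsx, ht'x, ht'sx]


lemma sum_map_update {l : List Int} (hl : l.Nodup) {f g : Int → Int} {a0 : Int} (ha : a0 ∈ l)
    (hoff : ∀ x ∈ l, x ≠ a0 → f x = g x) :
    (l.map f).sum = f a0 - g a0 + (l.map g).sum := by
  have hperm : l.Perm (a0 :: l.erase a0) := List.perm_cons_erase ha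
  have h1 := (hperm.map f).sum_eq
  have h2 := (hperm.map g).sum_eq
  have h3 : ((l.erase a0).map f) = ((l.erase a0).map g) := by
    apply List.map_congr_left
    intro x hx
    rcases (List.Nodup.mem_erase_iff hl).1 hx with ⟨hne, hmem⟩
    exact hoff x hmem hne
  rw [h1, h2]
  simp only [List.map_cons, List.sum_cons, h3]
  ring

lemma foldA_eq (s : Int) (ws : List Int) (init : PySem.Dict Int Int × Int) :
    ws.foldl (fun (st : PySem.Dict Int Int × Int) w =>
      if st.1.getD w 0 > 0 && st.1.getD (s - w) 0 > 0 then
        if w == s - w && st.1.getD w 0 < 2 then st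
        else
          let t1 := st.1.insert w (st.1.getD w 0 - 1)
          let t2 := t1.insert (s - w) (t1.getD (s - w) 0 - 1)
          (t2, st.2 + 1)
      else st) init = ws.foldl (stepA s) init := by
  apply PySem.List.foldl_congr_mem
  intro acc x _
  simp only [stepA, gt_iff_lt, Bool.and_eq_true, decide_eq_true_eq, beq_iff_eq]

lemma innerA_eq (s : Int) (ws : List Int) : ∀ (t : PySem.Dict Int Int) (k : Int),
    (ws.foldl (stepA s) (t, k)).2 = k + gA s ws (fun v => t.getD v 0) := by
  induction ws with
  | nil => intro t k; simp [gA]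
  | cons w ws ih =>
    intro t k
    rw [List.foldl_cons, gA]
    by_cases h1 : 0 < t.getD w 0 ∧ 0 < t.getD (s - w) 0
    · rw [if_pos h1]
      by_cases h2 : w = s - w ∧ t.getD w 0 < 2
      · rw [stepA, if_pos h1, if_pos h2, if_pos h2, ih t k]
      · rw [stepA, if_pos h1, if_neg h2, if_neg h2]
        have hfun : (fun v => ((t.insert w (t.getD w 0 - 1)).insert (s - w)
            ((t.insert w (t.getD w 0 - 1)).getD (s - w) 0 - 1)).getD v 0)
            = decAt (decAt (fun v => t.getD v 0) w) (s - w) := by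
          funext v
          simp [decAt, PySem.Dict.getD_insert]
        rw [ih _ (k + 1), hfun]
        ring
    · rw [stepA, if_neg h1, if_neg h1, ih t k]


lemma gA_eq_sum (s : Int) (S : List Int) (hS : S.Nodup) :
    ∀ (ws : List Int) (t : Int → Int), (∀ v, 0 ≤ t v) → (∀ w ∈ ws, w ∈ S ∧ s - w ∈ S) →
      gA s ws t = (S.map (Fterm s t ws)).sum := by
  intro ws
  induction ws with
  | nil =>
    intro t ht _
    rw [gA]
    symm
    apply List.sum_eq_zero
    intro x hx
    rcases List.mem_map.1 hx with ⟨a, _, rfl⟩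
    have h1 := ht a
    have h2 := ht (s - a)
    unfold Fterm pairTerm
    simp only [List.count_nil, Nat.cast_zero]
    split_ifs <;> omega
  | cons w ws ih =>
    intro t ht hmem
    obtain ⟨hwS, hbS⟩ := hmem w List.mem_cons_self
    have hmem' : ∀ x ∈ ws, x ∈ S ∧ s - x ∈ S := fun x hx => hmem x (List.mem_cons_of_mem _ hx)
    rw [gA]
    by_cases h1 : 0 < t w ∧ 0 < t (s - w)
    · obtain ⟨hp1, hp2⟩ := h1
      by_cases h2 : w = s - w ∧ t w < 2
      · -- skip branch: w pairs with itself but only one copy left; nothing changes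
        obtain ⟨hw2, htw2⟩ := h2
        rw [if_pos ⟨hp1, hp2⟩, if_pos ⟨hw2, htw2⟩, ih t ht hmem']
        rw [sum_map_update hS hwS (f := Fterm s t (w :: ws)) (g := Fterm s t ws)
          (fun x _ hxw => Fterm_off s t t ws w x hxw (by omega) rfl rfl)]
        have heq0 : Fterm s t (w :: ws) w = Fterm s t ws w := by
          unfold Fterm pairTerm
          rw [List.count_cons_self]
          split_ifs <;> omega
        omega
      · rw [if_pos ⟨hp1, hp2⟩, if_neg h2]
        set t' := decAt (decAt t w) (s - w) with hdef
        by_cases hw : w = s - w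
        · -- equal-pair success: t w ≥ 2, w's count drops by 2
          have htw2 : 2 ≤ t w := by omega
          have ht'v : ∀ v, t' v = if v = w then t w - 2 else t v := by
            intro v
            simp only [hdef, decAt, ← hw]
            split_ifs <;> omega
          have ht' : ∀ v, 0 ≤ t' v := by
            intro v; rw [ht'v]; have := ht v; split_ifs <;> omega
          rw [ih t' ht' hmem']
          rw [sum_map_update hS hwS (f := Fterm s t (w :: ws)) (g := Fterm s t' ws)
            (fun x _ hxw => Fterm_off s t t' ws w x hxw (by omega)
              (by rw [ht'v]; split_ifs <;> omega)
              (by rw [ht'v]; split_ifs <;> omega))]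
          have heq0 : Fterm s t (w :: ws) w = 1 + Fterm s t' ws w := by
            unfold Fterm pairTerm
            simp only [ht'v, List.count_cons_self]
            split_ifs <;> push_cast <;> omega
          omega
        · -- distinct-pair success: w and s-w each drop by 1
          have hws : 2 * w ≠ s := by omega
          have hbw : s - w ≠ w := by omega
          have ht'v : ∀ v, t' v = if v = s - w then t (s - w) - 1 else if v = w then t w - 1 else t v := by
            intro v
            simp only [hdef, decAt]
            split_ifs <;> omega
          have ht' : ∀ v, 0 ≤ t' v := by
            intro v; rw [ht'v]; have := ht v; split_ifs <;> omega
          rw [ih t' ht' hmem']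
          rcases lt_or_gt_of_ne hws with hlt | hgt
          · -- 2w < s: pair counted at w
            rw [sum_map_update hS hwS (f := Fterm s t (w :: ws)) (g := Fterm s t' ws) ?hoff]
            case hoff =>
              intro x _ hxw
              by_cases hxs : 2 * x ≤ s
              · exact Fterm_off s t t' ws w x hxw (by omega)
                  (by rw [ht'v]; split_ifs <;> omega)
                  (by rw [ht'v]; split_ifs <;> omega)
              · simp only [Fterm, if_neg hxs]
            have heq0 : Fterm s t (w :: ws) w = 1 + Fterm s t' ws w := by
              unfold Fterm pairTerm
              simp only [ht'v, List.count_cons_self, count_cons_ne (s - w) w ws hbw]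
              split_ifs <;> push_cast <;> omega
            omega
          · -- 2w > s: pair counted at s-w
            rw [sum_map_update hS hbS (f := Fterm s t (w :: ws)) (g := Fterm s t' ws) ?hoff]
            case hoff =>
              intro x _ hxb
              by_cases hxs : 2 * x ≤ s
              · exact Fterm_off s t t' ws w x (by omega) (by omega)
                  (by rw [ht'v]; split_ifs <;> omega)
                  (by rw [ht'v]; split_ifs <;> omega)
              · simp only [Fterm, if_neg hxs]
            have heq0 : Fterm s t (w :: ws) (s - w) = 1 + Fterm s t' ws (s - w) := by
              unfold Fterm pairTerm
              simp only [sub_sub_cancel, ht'v, List.count_cons_self,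
                count_cons_ne (s - w) w ws hbw]
              split_ifs <;> push_cast <;> omega
            omega
    · -- guard fails: one of the two counts is already zero, nothing changes
      rw [if_neg h1, ih t ht hmem']
      have hz : t w = 0 ∨ t (s - w) = 0 := by
        have := ht w; have := ht (s - w); omega
      rcases lt_trichotomy (2 * w) s with hlt | heq | hgt
      · rw [sum_map_update hS hwS (f := Fterm s t (w :: ws)) (g := Fterm s t ws) ?hoff]
        case hoff =>
          intro x _ hxw
          by_cases hxs : 2 * x ≤ s
          · exact Fterm_off s t t ws w x hxw (by omega) rfl rfl
          · simp only [Fterm, if_neg hxs]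
        have heq0 : Fterm s t (w :: ws) w = Fterm s t ws w := by
          unfold Fterm pairTerm
          simp only [List.count_cons_self, count_cons_ne (s - w) w ws (by omega)]
          split_ifs <;> push_cast <;> omega
        omega
      · rw [sum_map_update hS hwS (f := Fterm s t (w :: ws)) (g := Fterm s t ws)
          (fun x _ hxw => Fterm_off s t t ws w x hxw (by omega) rfl rfl)]
        have hww : s - w = w := by omega
        have heq0 : Fterm s t (w :: ws) w = Fterm s t ws w := by
          unfold Fterm pairTerm
          rw [hww] at hz
          simp only [List.count_cons_self]
          split_ifs <;> push_cast <;> omega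
        omega
      · rw [sum_map_update hS hbS (f := Fterm s t (w :: ws)) (g := Fterm s t ws) ?hoff]
        case hoff =>
          intro x _ hxb
          by_cases hxs : 2 * x ≤ s
          · exact Fterm_off s t t ws w x (by omega) (by omega) rfl rfl
          · simp only [Fterm, if_neg hxs]
        have heq0 : Fterm s t (w :: ws) (s - w) = Fterm s t ws (s - w) := by
          unfold Fterm pairTerm
          simp only [sub_sub_cancel, List.count_cons_self,
            count_cons_ne (s - w) w ws (by omega)]
          split_ifs <;> push_cast <;> omega
        omega

-- the closed-form value of the pair term at a weight actually present
lemma Fterm_eq_bterm (s : Int) (ws : List Int) (k : Int) :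
    Fterm s (cntF ws) ws k = bterm s ws k := by
  unfold Fterm pairTerm bterm cntF
  have h1 : (0:Int) ≤ (ws.count k : Int) := Int.natCast_nonneg _
  have h2 : (0:Int) ≤ (ws.count (s - k) : Int) := Int.natCast_nonneg _
  split_ifs <;> omega

lemma Fterm_zero_of_absent (s : Int) (ws : List Int) (a : Int) (ha : a ∉ ws) :
    Fterm s (cntF ws) ws a = 0 := by
  unfold Fterm pairTerm cntF
  have h0 : ws.count a = 0 := List.count_eq_zero.2 ha
  have h2 : (0:Int) ≤ (ws.count (s - a) : Int) := Int.natCast_nonneg _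
  rw [h0]
  split_ifs <;> omega

lemma inner_eq (s : Int) (weights : List Int) :
    (weights.foldl (fun (st : PySem.Dict Int Int × Int) w =>
      if st.1.getD w 0 > 0 && st.1.getD (s - w) 0 > 0 then
        if w == s - w && st.1.getD w 0 < 2 then st
        else
          let t1 := st.1.insert w (st.1.getD w 0 - 1)
          let t2 := t1.insert (s - w) (t1.getD (s - w) 0 - 1)
          (t2, st.2 + 1)
      else st) (PySem.Dict.counter weights, 0)).2 =
    (PySem.Dict.counter weights).items.foldl (fun (acc : Int) (p : Int × Int) =>
      if 2 * p.1 < s then acc + min p.2 ((PySem.Dict.counter weights).getD (s - p.1) 0)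
      else if 2 * p.1 == s then acc + PySem.Int.floordiv p.2 2
      else acc) 0 := by
  -- A side
  rw [foldA_eq, innerA_eq s weights (PySem.Dict.counter weights) 0]
  have hfun : (fun v => (PySem.Dict.counter weights).getD v 0) = cntF weights := by
    funext v
    exact PySem.Dict.getD_counter weights v
  rw [hfun, zero_add]
  -- index list: distinct weights, then any missing complements
  set K := PySem.Set.ofList weights with hK
  set E := (PySem.Set.ofList (weights.map (fun w => s - w))).filter
    (fun a => decide (a ∉ K)) with hE
  have hKnd : K.Nodup := PySem.Set.nodup_ofList weights
  have hEnd : E.Nodup := List.Nodup.filter _ (PySem.Set.nodup_ofList _)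
  have hdisj : List.Disjoint K E := by
    intro a haK haE
    have := (List.mem_filter.1 haE).2
    simp only [decide_eq_true_eq] at this
    exact this haK
  have hS : (K ++ E).Nodup := List.Nodup.append hKnd hEnd hdisj
  have hmem : ∀ w ∈ weights, w ∈ K ++ E ∧ s - w ∈ K ++ E := by
    intro w hw
    constructor
    · exact List.mem_append.2 (Or.inl ((PySem.Set.mem_ofList _ _).2 hw))
    · by_cases hc : s - w ∈ K
      · exact List.mem_append.2 (Or.inl hc)
      · refine List.mem_append.2 (Or.inr ?_)
        rw [hE]
        refine List.mem_filter.2 ⟨(PySem.Set.mem_ofList _ _).2 ?_, by simpa using hc⟩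
        exact List.mem_map.2 ⟨w, hw, rfl⟩
  have hcnt : ∀ v, 0 ≤ cntF weights v := by
    intro v; exact Int.natCast_nonneg _
  rw [gA_eq_sum s (K ++ E) hS weights (cntF weights) hcnt hmem]
  rw [List.map_append, List.sum_append]
  -- the padding part sums to zero
  have hEzero : (E.map (Fterm s (cntF weights) weights)).sum = 0 := by
    apply List.sum_eq_zero
    intro x hx
    rcases List.mem_map.1 hx with ⟨a, haE, rfl⟩
    have haK : a ∉ K := by
      have := (List.mem_filter.1 haE).2
      simpa using this
    have haw : a ∉ weights := fun h => haK ((PySem.Set.mem_ofList _ _).2 h)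
    exact Fterm_zero_of_absent s weights a haw
  rw [hEzero, add_zero]
  -- B side
  rw [PySem.Dict.items_counter, List.foldl_map]
  have hcong : K.foldl (fun (acc : Int) (k : Int) =>
      (fun (acc : Int) (p : Int × Int) =>
        if 2 * p.1 < s then acc + min p.2 ((PySem.Dict.counter weights).getD (s - p.1) 0)
        else if 2 * p.1 == s then acc + PySem.Int.floordiv p.2 2
        else acc) acc (k, (weights.count k : Int))) 0
      = K.foldl (fun acc k => acc + bterm s weights k) 0 := by
    apply PySem.List.foldl_congr_mem
    intro acc x _
    simp only [bterm, beq_iff_eq, PySem.Dict.getD_counter,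
      PySem.Int.floordiv_eq_ediv_of_pos (by norm_num : (0:Int) < 2)]
    split_ifs <;> omega
  rw [hcong, PySem.List.foldl_add, zero_add]
  apply congrArg
  apply List.map_congr_left
  intro k _
  exact Fterm_eq_bterm s weights k

-- ===== VERDICT (by name: the statement is the Claim_ definition above) =====
theorem max_teams_spec : Claim_equal_max_teams := by
  intro N weights _
  unfold Spec_max_teams max_teams max_teams_alt
  rw [PySem.Dict.foldl_insert_getD_add_one_eq_counter]
  simp only []
  apply PySem.List.foldl_congr_mem
  intro best s _
  exact congrArg (max best) (inner_eq s weights)
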